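-- pv_equiv track=rewrite | github.com/portholl/Python_3_course | MroC3.py | MroC3
-- ===== SOURCE A (Python) =====
-- def MroC3(code):
--     classes = {}
--     for line in code:
--         if line.startswith("class "):
--             line = line.strip()
--             start_name_index = line.find('class ') + len('class ')
--             end_name_index = line.find('(') if line.find('(') > 0 else line.find(':')
--             name = line[start_name_index : end_name_index]
--             parents = []
--             if '(' in line:
--                 line = line[end_name_index + 1:].rstrip(' pass').rstrip('):')
--                 parents = line.split(', ')
--             parent_classes = tuple(classes[parent] for parent in parents if parent in classes)
--             try:
--                 classes[name] = type(name, parent_classes, {})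
--             except (KeyError, TypeError):
--                 return 'No'
--     return 'Yes'
-- ===== SOURCE B (Python) =====
-- # Same observable behaviour as A, but without building real classes with type():
-- # each class is represented by its own C3 linearization (computed by an explicit
-- # C3 merge) stored under its name, with a numeric id for object identity.
-- def _parse_class(raw):
--     line = raw.strip()
--     lp = line.find('(')
--     end = lp if lp > 0 else line.find(':')
--     start = line.find('class ') + 6
--     name = line[start:end] if end >= 0 else line[start:-1]
--     parents = []
--     if lp >= 0:
--         parents = line[end + 1:].rstrip(' pass').rstrip('):').split(', ')
--     return name, parents
--
--
-- def _c3_merge(seqs):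
--     seqs = [s for s in seqs if s]
--     result = []
--     while seqs:
--         head = None
--         for s in seqs:
--             cand = s[0]
--             if not any(cand in t[1:] for t in seqs):
--                 head = cand
--                 break
--         if head is None:       # no valid head: C3 inconsistency
--             return None        # (a duplicated direct base also lands here)
--         result.append(head)
--         seqs = [t[1:] if t[0] == head else t for t in seqs]
--         seqs = [t for t in seqs if t]
--     return result
--
--
-- def MroC3(code):
--     lin = {}          # name -> (identity id, C3 linearization as a list of ids)
--     next_id = 0
--     for raw in code:
--         if not raw.startswith("class "):
--             continue
--         name, parents = _parse_class(raw)
--         bases = [lin[p] for p in parents if p in lin]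
--         merged = _c3_merge([b[1] for b in bases] + [[b[0] for b in bases]])
--         if merged is None:
--             return 'No'
--         lin[name] = (next_id, [next_id] + merged)
--         next_id += 1
--     return 'Yes'
-- ===== Notes on version B (the rewrite author's own statement) =====
-- stated objective: alternative
-- what changed: A builds real classes with CPython's type() and lets its internal MRO machinery decide validity; B keeps no class objects at all and instead stores each class's C3 linearization (with a numeric identity id) in a dict and runs the C3 merge explicitly per class definition.
import Mathlib
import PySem

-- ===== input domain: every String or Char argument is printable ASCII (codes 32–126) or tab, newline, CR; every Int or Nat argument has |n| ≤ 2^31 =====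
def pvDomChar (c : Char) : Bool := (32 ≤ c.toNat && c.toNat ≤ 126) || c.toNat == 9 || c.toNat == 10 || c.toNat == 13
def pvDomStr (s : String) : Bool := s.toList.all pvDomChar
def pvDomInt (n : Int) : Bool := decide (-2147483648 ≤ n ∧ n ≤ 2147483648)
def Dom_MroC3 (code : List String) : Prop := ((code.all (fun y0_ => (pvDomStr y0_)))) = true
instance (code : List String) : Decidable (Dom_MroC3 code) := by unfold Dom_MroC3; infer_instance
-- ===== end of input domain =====

-- B replaces A's reliance on CPython's type() (which builds real classes and computes
-- their MRO internally) by an explicit C3 merge over stored per-class linearizations;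
-- objective: alternative (self-contained, no class-object machinery), same cost.

-- shared exact port of Python's str.rstrip(chars): drop trailing characters in the set
def rstripChars (s chars : List Char) : List Char :=
  (s.reverse.dropWhile (fun c => c ∈ chars)).reverse

-- shared C3 merge (the algorithm inside CPython's type() on the A side, and the
-- transliteration of Source B's _c3_merge on the B side); none = inconsistent hierarchy
def c3pick (seqs : List (List Nat)) : Option Nat :=
  seqs.findSome? fun s =>
    match s with
    | [] => none
    | h :: _ => if seqs.any (fun t => (t.drop 1).contains h) then none else some h

def c3mergeGo : Nat → List (List Nat) → Option (List Nat)
  | _, [] => some []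
  | 0, _ :: _ => none
  | fuel + 1, s :: ss =>
    match c3pick (s :: ss) with
    | none => none
    | some h =>
      (c3mergeGo fuel (((s :: ss).map (fun t => if t.head? == some h then t.drop 1 else t)).filter
        (fun t => !t.isEmpty))).map (h :: ·)

def c3merge (seqs : List (List Nat)) : Option (List Nat) :=
  c3mergeGo ((seqs.map List.length).sum) (seqs.filter (fun t => !t.isEmpty))

-- ===== PORT A =====
-- A keeps a dict name -> class object; here a class object is its numeric identity id,
-- with tbl recording each id's direct-base ids (the object graph type() sees).
-- type(name, bases, {}) is hand-ported: each base's MRO is recomputed from the graph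
-- (mroOf) and C3-merged with the base list; any failure (incl. a duplicated direct
-- base, which the merge rejects) = type()'s TypeError = "No". The implicit trailing
-- `object` of every real MRO is omitted: it never affects whether the merge succeeds.
def mroOf (tbl : PySem.Dict Nat (List Nat)) : Nat → Nat → Option (List Nat)
  | 0, _ => none
  | fuel + 1, i =>
    match (tbl.getD i []).mapM (mroOf tbl fuel) with
    | none => none
    | some ls => (c3merge (ls ++ [tbl.getD i []])).map (i :: ·)

def runA : PySem.Dict (List Char) Nat → PySem.Dict Nat (List Nat) → Nat → List (List Char) → String
  | _, _, _, [] => "Yes"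
  | classes, tbl, n, line0 :: rest =>
    if PySem.Chars.startswith line0 ("class ".toList) then
      let line1 := PySem.Chars.strip line0
      let startIdx : Int := PySem.Chars.find line1 ("class ".toList) + 6
      let endIdx : Int :=
        if PySem.Chars.find line1 ("(".toList) > 0 then PySem.Chars.find line1 ("(".toList)
        else PySem.Chars.find line1 (":".toList)
      let name := PySem.List.slice line1 (some startIdx) (some endIdx)
      let parents : List (List Char) :=
        if PySem.Chars.isIn ("(".toList) line1 then
          PySem.Chars.splitOn
            (rstripChars (rstripChars (PySem.List.slice line1 (some (endIdx + 1)) none)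
              (" pas".toList)) ("):".toList)) (", ".toList)
        else []
      let parentIds := parents.filterMap (fun p => classes.get? p)
      match parentIds.mapM (fun b => mroOf tbl (b + 1) b) with
      | none => "No"
      | some ls =>
        match c3merge (ls ++ [parentIds]) with
        | none => "No"
        | some _ => runA (classes.insert name n) (tbl.insert n parentIds) (n + 1) rest
    else runA classes tbl n rest

def MroC3 (code : List String) : String :=
  runA PySem.Dict.empty PySem.Dict.empty 0 (code.map String.toList)

-- ===== PORT B =====
def parseClass (raw : List Char) : List Char × List (List Char) :=
  let line := PySem.Chars.strip raw
  let lp : Int := PySem.Chars.find line ("(".toList)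
  let endIdx : Int := if lp > 0 then lp else PySem.Chars.find line (":".toList)
  let start : Int := PySem.Chars.find line ("class ".toList) + 6
  let name :=
    if 0 ≤ endIdx then PySem.List.slice line (some start) (some endIdx)
    else PySem.List.slice line (some start) (some (-1))
  let parents : List (List Char) :=
    if 0 ≤ lp then
      PySem.Chars.splitOn
        (rstripChars (rstripChars (PySem.List.slice line (some (endIdx + 1)) none)
          (" pas".toList)) ("):".toList)) (", ".toList)
    else []
  (name, parents)

def runB : PySem.Dict (List Char) (Nat × List Nat) → Nat → List (List Char) → String
  | _, _, [] => "Yes"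
  | lin, n, raw :: rest =>
    if !(PySem.Chars.startswith raw ("class ".toList)) then runB lin n rest
    else
      let np := parseClass raw
      let bases := np.2.filterMap (fun p => lin.get? p)
      match c3merge (bases.map Prod.snd ++ [bases.map Prod.fst]) with
      | none => "No"
      | some merged => runB (lin.insert np.1 (n, n :: merged)) (n + 1) rest

def MroC3_alt (code : List String) : String :=
  runB PySem.Dict.empty 0 (code.map String.toList)

-- ===== PRECONDITION & SPEC =====
def Spec_MroC3 (code : List String) (out : String) : Prop := out = MroC3_alt code
instance (code : List String) (out : String) : Decidable (Spec_MroC3 code out) := by unfold Spec_MroC3; infer_instance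

-- ===== CLAIM (what is proved, stated in full; the proofs are below) =====
def Claim_equal_MroC3 : Prop := ∀ (code : List String), Dom_MroC3 code → Spec_MroC3 code (MroC3 code)

-- ===== LEMMAS AND PROOFS =====

-- the invariant tying A's state (classes, tbl) to B's state (lin)
def MroInv (classes : PySem.Dict (List Char) Nat) (tbl : PySem.Dict Nat (List Nat)) (n : Nat)
    (lin : PySem.Dict (List Char) (Nat × List Nat)) : Prop :=
  (∀ p : List Char,
      (classes.get? p = none ∧ lin.get? p = none) ∨
      (∃ i l, classes.get? p = some i ∧ lin.get? p = some (i, l) ∧ i < n ∧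
        mroOf tbl (i + 1) i = some l)) ∧
  (∀ j : Nat, ∀ b ∈ tbl.getD j [], b < j)

theorem mapM_option_congr {α β : Type} (bs : List α) (f g : α → Option β)
    (h : ∀ b ∈ bs, f b = g b) : bs.mapM f = bs.mapM g := by
  induction bs with
  | nil => rfl
  | cons b bs ih =>
    simp only [List.mapM_cons, h b (List.mem_cons_self), ih (fun x hx => h x (List.mem_cons_of_mem _ hx))]

theorem mapM_option_mono {α β : Type} (bs : List α) (F G : α → Option β)
    (h : ∀ b ∈ bs, ∀ l, F b = some l → G b = some l) :
    ∀ ls, bs.mapM F = some ls → bs.mapM G = some ls := by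
  induction bs with
  | nil => intro ls hls; exact hls
  | cons b bs ih =>
    intro ls hls
    simp only [List.mapM_cons, Option.bind_eq_bind, Option.pure_def] at hls ⊢
    cases hF : F b with
    | none => rw [hF] at hls; cases hls
    | some v =>
      rw [hF] at hls
      rw [h b List.mem_cons_self v hF]
      simp only [Option.bind_some] at hls ⊢
      cases hFs : bs.mapM F with
      | none => rw [hFs] at hls; cases hls
      | some vs =>
        rw [hFs] at hls
        rw [ih (fun x hx => h x (List.mem_cons_of_mem _ hx)) vs hFs]
        exact hls

theorem mroOf_mono (tbl : PySem.Dict Nat (List Nat)) :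
    ∀ f f' i l, f ≤ f' → mroOf tbl f i = some l → mroOf tbl f' i = some l := by
  intro f
  induction f with
  | zero => intro f' i l _ h; simp [mroOf] at h
  | succ f ih =>
    intro f' i l hle h
    obtain ⟨f'', rfl⟩ : ∃ f'', f' = f'' + 1 := ⟨f' - 1, by omega⟩
    rw [mroOf] at h ⊢
    cases hm : (tbl.getD i []).mapM (mroOf tbl f) with
    | none => rw [hm] at h; cases h
    | some ls =>
      rw [hm] at h
      rw [mapM_option_mono _ _ _ (fun b _ l' hb => ih f'' b l' (by omega) hb) ls hm]
      exact h

theorem mroOf_insert_stable (tbl : PySem.Dict Nat (List Nat)) (m : Nat) (bs : List Nat)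
    (hdec : ∀ j : Nat, ∀ b ∈ tbl.getD j [], b < j) :
    ∀ f i, i < m → mroOf (tbl.insert m bs) f i = mroOf tbl f i := by
  intro f
  induction f with
  | zero => intro i _; rfl
  | succ f ih =>
    intro i him
    rw [mroOf, mroOf]
    have hg : (tbl.insert m bs).getD i [] = tbl.getD i [] := by
      rw [PySem.Dict.getD_insert]; exact if_neg (by omega)
    rw [hg]
    rw [mapM_option_congr _ _ _ (fun b hb => ih b (by have := hdec i b hb; omega))]

theorem mapM_fst_eq_some (bases : List (Nat × List Nat)) (F : Nat → Option (List Nat))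
    (h : ∀ b ∈ bases, F b.1 = some b.2) :
    (bases.map Prod.fst).mapM F = some (bases.map Prod.snd) := by
  induction bases with
  | nil => rfl
  | cons b bs ih =>
    simp only [List.map_cons, List.mapM_cons, h b List.mem_cons_self,
      ih (fun x hx => h x (List.mem_cons_of_mem _ hx)), Option.bind_eq_bind, Option.bind_some,
      Option.pure_def]

theorem bases_rel (tbl : PySem.Dict Nat (List Nat)) (n : Nat)
    (classes : PySem.Dict (List Char) Nat) (lin : PySem.Dict (List Char) (Nat × List Nat))
    (h1 : ∀ p : List Char,
      (classes.get? p = none ∧ lin.get? p = none) ∨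
      (∃ i l, classes.get? p = some i ∧ lin.get? p = some (i, l) ∧ i < n ∧
        mroOf tbl (i + 1) i = some l))
    (parents : List (List Char)) :
    parents.filterMap (fun p => classes.get? p) =
      (parents.filterMap (fun p => lin.get? p)).map Prod.fst ∧
    ∀ b ∈ parents.filterMap (fun p => lin.get? p),
      b.1 < n ∧ mroOf tbl (b.1 + 1) b.1 = some b.2 := by
  induction parents with
  | nil => exact ⟨rfl, by simp⟩
  | cons p ps ih =>
    rcases h1 p with ⟨hc, hl⟩ | ⟨i, l, hc, hl, hi, hm⟩
    · simpa only [List.filterMap_cons, hc, hl] using ih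
    · simp only [List.filterMap_cons, hc, hl, List.map_cons]
      refine ⟨by rw [ih.1], ?_⟩
      intro b hb
      rcases List.mem_cons.mp hb with rfl | hb
      · exact ⟨hi, hm⟩
      · exact ih.2 b hb

theorem MroInv_step (classes : PySem.Dict (List Char) Nat) (tbl : PySem.Dict Nat (List Nat))
    (n : Nat) (lin : PySem.Dict (List Char) (Nat × List Nat)) (name : List Char)
    (bases : List (Nat × List Nat)) (m : List Nat)
    (h1 : ∀ p : List Char,
      (classes.get? p = none ∧ lin.get? p = none) ∨
      (∃ i l, classes.get? p = some i ∧ lin.get? p = some (i, l) ∧ i < n ∧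
        mroOf tbl (i + 1) i = some l))
    (h2 : ∀ j : Nat, ∀ b ∈ tbl.getD j [], b < j)
    (hpt : ∀ b ∈ bases, b.1 < n ∧ mroOf tbl (b.1 + 1) b.1 = some b.2)
    (hm : c3merge (bases.map Prod.snd ++ [bases.map Prod.fst]) = some m) :
    MroInv (classes.insert name n) (tbl.insert n (bases.map Prod.fst)) (n + 1)
      (lin.insert name (n, n :: m)) := by
  have h2' : ∀ j : Nat, ∀ b ∈ (tbl.insert n (bases.map Prod.fst)).getD j [], b < j := by
    intro j b hb
    rw [PySem.Dict.getD_insert] at hb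
    by_cases hj : j = n
    · subst hj; rw [if_pos rfl] at hb
      obtain ⟨x, hx, rfl⟩ := List.mem_map.mp hb
      exact (hpt x hx).1
    · rw [if_neg hj] at hb; exact h2 j b hb
  have hnew : mroOf (tbl.insert n (bases.map Prod.fst)) (n + 1) n = some (n :: m) := by
    rw [mroOf]
    have hg : (tbl.insert n (bases.map Prod.fst)).getD n [] = bases.map Prod.fst := by
      rw [PySem.Dict.getD_insert, if_pos rfl]
    rw [hg]
    have hmm : (bases.map Prod.fst).mapM (mroOf (tbl.insert n (bases.map Prod.fst)) n) =
        some (bases.map Prod.snd) := by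
      apply mapM_fst_eq_some
      intro b hb
      rw [mroOf_insert_stable tbl n _ h2 n b.1 (hpt b hb).1]
      exact mroOf_mono tbl (b.1 + 1) n b.1 b.2 (by have := (hpt b hb).1; omega) (hpt b hb).2
    rw [hmm]
    simp [hm]
  refine ⟨?_, h2'⟩
  intro p
  by_cases hp : p = name
  · subst hp
    right
    exact ⟨n, n :: m, by rw [PySem.Dict.get?_insert, if_pos rfl],
      by rw [PySem.Dict.get?_insert, if_pos rfl], by omega, hnew⟩
  · rcases h1 p with ⟨hc, hl⟩ | ⟨i, l, hc, hl, hi, hmi⟩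
    · left
      rw [PySem.Dict.get?_insert, if_neg hp, PySem.Dict.get?_insert, if_neg hp]
      exact ⟨hc, hl⟩
    · right
      refine ⟨i, l, by rw [PySem.Dict.get?_insert, if_neg hp]; exact hc,
        by rw [PySem.Dict.get?_insert, if_neg hp]; exact hl, by omega, ?_⟩
      rw [mroOf_insert_stable tbl n _ h2 (i + 1) i hi]
      exact hmi

theorem parseClass_eq (raw : List Char) :
    parseClass raw =
      (PySem.List.slice (PySem.Chars.strip raw)
        (some (PySem.Chars.find (PySem.Chars.strip raw) ("class ".toList) + 6))
        (some (if PySem.Chars.find (PySem.Chars.strip raw) ("(".toList) > 0 then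
            PySem.Chars.find (PySem.Chars.strip raw) ("(".toList)
          else PySem.Chars.find (PySem.Chars.strip raw) (":".toList))),
       if PySem.Chars.isIn ("(".toList) (PySem.Chars.strip raw) then
         PySem.Chars.splitOn
           (rstripChars (rstripChars (PySem.List.slice (PySem.Chars.strip raw)
             (some ((if PySem.Chars.find (PySem.Chars.strip raw) ("(".toList) > 0 then
                 PySem.Chars.find (PySem.Chars.strip raw) ("(".toList)
               else PySem.Chars.find (PySem.Chars.strip raw) (":".toList)) + 1)) none)
             (" pas".toList)) ("):".toList)) (", ".toList)
       else []) := by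
  simp only [parseClass]
  generalize hE : (if PySem.Chars.find (PySem.Chars.strip raw) ("(".toList) > 0 then
      PySem.Chars.find (PySem.Chars.strip raw) ("(".toList)
    else PySem.Chars.find (PySem.Chars.strip raw) (":".toList)) = e
  have he : -1 ≤ e := by
    rw [← hE]; split <;> exact PySem.Chars.neg_one_le_find _ _
  have hcond : (0 ≤ PySem.Chars.find (PySem.Chars.strip raw) ("(".toList)) ↔
      (PySem.Chars.isIn ("(".toList) (PySem.Chars.strip raw) = true) := by
    rw [PySem.Chars.isIn_iff_infix]
    exact PySem.Chars.find_nonneg_iff _ _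
  rw [Prod.mk.injEq]
  constructor
  · split_ifs with h0
    · rfl
    · have h1 : e = -1 := by omega
      rw [h1]
  · by_cases hin : 0 ≤ PySem.Chars.find (PySem.Chars.strip raw) ("(".toList)
    · rw [if_pos hin, if_pos (hcond.mp hin)]
    · rw [if_neg hin, if_neg (fun hc => hin (hcond.mpr hc))]

theorem runAB : ∀ (lines : List (List Char)) classes tbl n lin,
    MroInv classes tbl n lin → runA classes tbl n lines = runB lin n lines := by
  intro lines
  induction lines with
  | nil => intro classes tbl n lin _; rfl
  | cons line0 rest ih =>
    intro classes tbl n lin hInv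
    obtain ⟨h1, h2⟩ := hInv
    by_cases hs : PySem.Chars.startswith line0 ("class ".toList) = true
    · simp only [runA, runB, hs, Bool.not_true, Bool.false_eq_true, if_false, if_true,
        parseClass_eq line0]
      generalize (if PySem.Chars.isIn ("(".toList) (PySem.Chars.strip line0) = true then
          PySem.Chars.splitOn
            (rstripChars (rstripChars (PySem.List.slice (PySem.Chars.strip line0)
              (some ((if PySem.Chars.find (PySem.Chars.strip line0) ("(".toList) > 0 then
                  PySem.Chars.find (PySem.Chars.strip line0) ("(".toList)
                else PySem.Chars.find (PySem.Chars.strip line0) (":".toList)) + 1)) none)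
              (" pas".toList)) ("):".toList)) (", ".toList)
        else []) = parents
      obtain ⟨hfst, hpt⟩ := bases_rel tbl n classes lin h1 parents
      rw [hfst]
      rw [mapM_fst_eq_some _ _ (fun b hb => (hpt b hb).2)]
      cases hmg : c3merge ((parents.filterMap (fun p => lin.get? p)).map Prod.snd ++
          [(parents.filterMap (fun p => lin.get? p)).map Prod.fst]) with
      | none => simp only [hmg]
      | some m =>
        simp only [hmg]
        exact ih _ _ _ _ (MroInv_step classes tbl n lin _ _ m h1 h2 hpt hmg)
    · simp only [Bool.not_eq_true] at hs
      simp only [runA, runB, hs, Bool.not_false, if_true, Bool.false_eq_true, if_false]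
      exact ih _ _ _ _ ⟨h1, h2⟩

theorem MroInv_empty : MroInv PySem.Dict.empty PySem.Dict.empty 0 PySem.Dict.empty := by
  constructor
  · intro p; left; exact ⟨PySem.Dict.get?_empty p, PySem.Dict.get?_empty p⟩
  · intro j b hb; rw [PySem.Dict.getD_empty] at hb; cases hb

-- ===== VERDICT (by name: the statement is the Claim_ definition above) =====
theorem MroC3_spec : Claim_equal_MroC3 := by
  intro code _
  unfold Spec_MroC3 MroC3 MroC3_alt
  exact runAB _ _ _ _ _ MroInv_empty
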